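-- pv_equiv track=rewrite | github.com/yelimkong/programmers | 프로그래머스/lv0/120861. 캐릭터의 좌표/캐릭터의 좌표.py | solution
-- ===== SOURCE A (Python) =====
-- def solution(keyinput, board):
--     limit_x = board[0]//2
--     limit_y = board[1]//2
--     start = [0,0]
--
--     direction = {'up' : [0,1], 'down' : [0,-1],'left' : [-1,0], 'right' : [1,0]}
--     for i in keyinput:
--         dx, dy = direction[i]
--         if abs(start[0] + dx)> limit_x or abs(start[1]+dy) >limit_y:
--             continue
--         else:
--             start[0] += dx
--             start[1] += dy
--     return start
-- ===== SOURCE B (Python) =====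
-- def solution(keyinput, board):
--     # The board's cells are the points (x, y) with |x| <= board[0]//2 and
--     # |y| <= board[1]//2.  Each key moves one unit along a single axis and a
--     # move that would leave the board is ignored, so the two axes evolve
--     # independently: ignoring an off-board unit step is the same as clamping
--     # the coordinate to its range.
--     half_w = board[0] // 2
--     half_h = board[1] // 2
--     if half_w < 0 or half_h < 0:
--         # the board has no cells at all, so the character has nowhere to go
--         return [0, 0]
--     x = 0
--     for key in keyinput:
--         if key == 'left':
--             x = max(x - 1, -half_w)
--         elif key == 'right':
--             x = min(x + 1, half_w)
--     y = 0
--     for key in keyinput: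
--         if key == 'up':
--             y = min(y + 1, half_h)
--         elif key == 'down':
--             y = max(y - 1, -half_h)
--     return [x, y]
-- ===== Notes on version B (the rewrite author's own statement) =====
-- stated objective: alternative
-- what changed: Replaces the coupled 2-D skip-if-out-of-bounds simulation over a direction dict with two independent per-axis passes that clamp each unit step with min/max (for unit steps, ignoring an off-board move equals clamping the coordinate), with the cell-less degenerate board handled up front.
import Mathlib
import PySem

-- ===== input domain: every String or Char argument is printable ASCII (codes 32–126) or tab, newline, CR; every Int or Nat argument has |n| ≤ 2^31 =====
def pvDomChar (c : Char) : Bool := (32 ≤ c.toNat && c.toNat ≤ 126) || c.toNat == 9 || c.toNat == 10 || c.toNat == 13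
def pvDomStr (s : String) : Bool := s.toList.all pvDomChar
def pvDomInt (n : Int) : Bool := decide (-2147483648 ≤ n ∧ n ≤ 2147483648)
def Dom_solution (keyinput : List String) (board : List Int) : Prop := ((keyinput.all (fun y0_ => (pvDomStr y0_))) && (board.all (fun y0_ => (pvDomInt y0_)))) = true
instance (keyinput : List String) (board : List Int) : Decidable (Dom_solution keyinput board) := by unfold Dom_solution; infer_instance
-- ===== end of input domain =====

-- B replaces A's coupled 2-D skip-if-out-of-bounds simulation over a direction dict
-- by two independent per-axis clamping passes (for unit steps, ignoring an off-board
-- move equals clamping the coordinate), with the cell-less degenerate board up front.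


-- ===== PORT A =====
-- the dict literal 'direction'
def direction : PySem.Dict String (Int × Int) :=
  PySem.Dict.ofList [("up", (0, 1)), ("down", (0, -1)), ("left", (-1, 0)), ("right", (1, 0))]

-- body of A's for-loop (KeyError on a missing key is excluded by Pre_solution;
-- the 'none' branch is junk outside Pre_)
def stepA (limit_x limit_y : Int) (st : Int × Int) (i : String) : Int × Int :=
  match direction.get? i with
  | some d =>
      if |st.1 + d.1| > limit_x ∨ |st.2 + d.2| > limit_y then st
      else (st.1 + d.1, st.2 + d.2)
  | none => st

def solution (keyinput : List String) (board : List Int) : List Int :=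
  match PySem.List.pyGet? board 0, PySem.List.pyGet? board 1 with
  | some b0, some b1 =>
      let limit_x := PySem.Int.floordiv b0 2
      let limit_y := PySem.Int.floordiv b1 2
      let start := keyinput.foldl (stepA limit_x limit_y) (0, 0)
      [start.1, start.2]
  | _, _ => []   -- IndexError in Python: excluded by Pre_solution

-- ===== PORT B =====
def stepX (limit_x : Int) (x : Int) (key : String) : Int :=
  if key = "left" then max (x - 1) (-limit_x)
  else if key = "right" then min (x + 1) limit_x
  else x

def stepY (limit_y : Int) (y : Int) (key : String) : Int :=
  if key = "up" then min (y + 1) limit_y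
  else if key = "down" then max (y - 1) (-limit_y)
  else y

def solution_alt (keyinput : List String) (board : List Int) : List Int :=
  match PySem.List.pyGet? board 0 with
  | none => []   -- IndexError in Python: excluded by Pre_solution
  | some b0 =>
    match PySem.List.pyGet? board 1 with
    | none => []   -- IndexError in Python: excluded by Pre_solution
    | some b1 =>
      let half_w := PySem.Int.floordiv b0 2
      let half_h := PySem.Int.floordiv b1 2
      if half_w < 0 ∨ half_h < 0 then [0, 0]
      else
        let x := keyinput.foldl (stepX half_w) 0
        let y := keyinput.foldl (stepY half_h) 0
        [x, y]

-- ===== PRECONDITION & SPEC =====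
-- exactly the inputs on which A returns: board has at least two entries (else
-- IndexError) and every key is one of the four directions (else KeyError)
def Pre_solution (keyinput : List String) (board : List Int) : Prop :=
  2 ≤ board.length ∧
  ∀ k ∈ keyinput, k = "up" ∨ k = "down" ∨ k = "left" ∨ k = "right"
instance (keyinput : List String) (board : List Int) : Decidable (Pre_solution keyinput board) := by
  unfold Pre_solution; infer_instance
def pvWitness_solution : List String × List Int := (["up", "left", "left"], [4, 5])

def Spec_solution (keyinput : List String) (board : List Int) (out : List Int) : Prop := out = solution_alt keyinput board
instance (keyinput : List String) (board : List Int) (out : List Int) : Decidable (Spec_solution keyinput board out) := by unfold Spec_solution; infer_instance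

-- ===== CLAIM =====
def Claim_equal_solution : Prop := ∀ (keyinput : List String) (board : List Int), Dom_solution keyinput board → Pre_solution keyinput board → Spec_solution keyinput board (solution keyinput board)

-- ===== LEMMAS AND PROOFS =====

-- get? values of the literal dict
theorem dir_up : direction.get? "up" = some (0, 1) := by decide
theorem dir_down : direction.get? "down" = some (0, -1) := by decide
theorem dir_left : direction.get? "left" = some (-1, 0) := by decide
theorem dir_right : direction.get? "right" = some (1, 0) := by decide

-- on a board with no cells (a negative half-dimension), A's loop never moves
theorem foldA_neg (lx ly : Int) (hn : lx < 0 ∨ ly < 0) (ks : List String)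
    (hv : ∀ k ∈ ks, k = "up" ∨ k = "down" ∨ k = "left" ∨ k = "right") :
    ks.foldl (stepA lx ly) (0, 0) = (0, 0) := by
  induction ks with
  | nil => rfl
  | cons k ks ih =>
    have hk := hv k (by simp)
    have hstep : stepA lx ly (0, 0) k = (0, 0) := by
      rcases hk with h | h | h | h <;> subst h <;>
        simp only [stepA, dir_up, dir_down, dir_left, dir_right] <;>
        (rw [if_pos]; rcases hn with hn | hn <;> simp <;> omega)
    simp only [List.foldl_cons, hstep]
    exact ih (fun k hk => hv k (by simp [hk]))

-- with nonnegative limits, A's coupled fold equals the pair of B's per-axis folds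
theorem foldA_split (lx ly : Int) (hx0 : 0 ≤ lx) (hy0 : 0 ≤ ly) (ks : List String)
    (hv : ∀ k ∈ ks, k = "up" ∨ k = "down" ∨ k = "left" ∨ k = "right")
    (x y : Int) (hx : |x| ≤ lx) (hy : |y| ≤ ly) :
    ks.foldl (stepA lx ly) (x, y) = (ks.foldl (stepX lx) x, ks.foldl (stepY ly) y) := by
  induction ks generalizing x y with
  | nil => rfl
  | cons k ks ih =>
    have hk := hv k (by simp)
    have hv' : ∀ k ∈ ks, k = "up" ∨ k = "down" ∨ k = "left" ∨ k = "right" :=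
      fun k hk => hv k (by simp [hk])
    rw [abs_le] at hx hy
    simp only [List.foldl_cons]
    rcases hk with h | h | h | h <;> subst h
    · have hA : stepA lx ly (x, y) "up" = (x, min (y + 1) ly) := by
        simp only [stepA, dir_up]
        by_cases hc : |x + 0| > lx ∨ |y + 1| > ly
        · rw [if_pos hc]
          rcases hc with hc | hc <;> rw [gt_iff_lt, lt_abs] at hc <;>
            (have : min (y + 1) ly = y := by omega
             simp [this])
        · rw [if_neg hc]
          push_neg at hc
          simp only [abs_le] at hc
          have : min (y + 1) ly = y + 1 := by omega
          simp [this] <;> omega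
      rw [hA]
      have : stepX lx x "up" = x := by simp [stepX]
      rw [show ks.foldl (stepX lx) (stepX lx x "up") = ks.foldl (stepX lx) x from by rw [this],
          show stepY ly y "up" = min (y + 1) ly from by simp [stepY]]
      exact ih hv' x (min (y + 1) ly) (by rw [abs_le]; omega) (by rw [abs_le]; omega)
    · have hA : stepA lx ly (x, y) "down" = (x, max (y - 1) (-ly)) := by
        simp only [stepA, dir_down]
        by_cases hc : |x + 0| > lx ∨ |y + -1| > ly
        · rw [if_pos hc]
          rcases hc with hc | hc <;> rw [gt_iff_lt, lt_abs] at hc <;>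
            (have : max (y - 1) (-ly) = y := by omega
             simp [this])
        · rw [if_neg hc]
          push_neg at hc
          simp only [abs_le] at hc
          have : max (y - 1) (-ly) = y - 1 := by omega
          simp [this] <;> omega
      rw [hA]
      have h1 : stepX lx x "down" = x := by simp [stepX]
      have h2 : stepY ly y "down" = max (y - 1) (-ly) := by simp [stepY]
      rw [show ks.foldl (stepX lx) (stepX lx x "down") = ks.foldl (stepX lx) x from by rw [h1], h2]
      exact ih hv' x (max (y - 1) (-ly)) (by rw [abs_le]; omega) (by rw [abs_le]; omega)
    · have hA : stepA lx ly (x, y) "left" = (max (x - 1) (-lx), y) := by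
        simp only [stepA, dir_left]
        by_cases hc : |x + -1| > lx ∨ |y + 0| > ly
        · rw [if_pos hc]
          rcases hc with hc | hc <;> rw [gt_iff_lt, lt_abs] at hc <;>
            (have : max (x - 1) (-lx) = x := by omega
             simp [this])
        · rw [if_neg hc]
          push_neg at hc
          simp only [abs_le] at hc
          have : max (x - 1) (-lx) = x - 1 := by omega
          simp [this] <;> omega
      rw [hA]
      have h1 : stepX lx x "left" = max (x - 1) (-lx) := by simp [stepX]
      have h2 : stepY ly y "left" = y := by simp [stepY]
      rw [h1, show ks.foldl (stepY ly) (stepY ly y "left") = ks.foldl (stepY ly) y from by rw [h2]]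
      exact ih hv' (max (x - 1) (-lx)) y (by rw [abs_le]; omega) (by rw [abs_le]; omega)
    · have hA : stepA lx ly (x, y) "right" = (min (x + 1) lx, y) := by
        simp only [stepA, dir_right]
        by_cases hc : |x + 1| > lx ∨ |y + 0| > ly
        · rw [if_pos hc]
          rcases hc with hc | hc <;> rw [gt_iff_lt, lt_abs] at hc <;>
            (have : min (x + 1) lx = x := by omega
             simp [this])
        · rw [if_neg hc]
          push_neg at hc
          simp only [abs_le] at hc
          have : min (x + 1) lx = x + 1 := by omega
          simp [this] <;> omega
      rw [hA]
      have h1 : stepX lx x "right" = min (x + 1) lx := by simp [stepX]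
      have h2 : stepY ly y "right" = y := by simp [stepY]
      rw [h1, show ks.foldl (stepY ly) (stepY ly y "right") = ks.foldl (stepY ly) y from by rw [h2]]
      exact ih hv' (min (x + 1) lx) y (by rw [abs_le]; omega) (by rw [abs_le]; omega)

-- ===== VERDICT =====
theorem solution_spec : Claim_equal_solution := by
  intro keyinput board _ hpre
  obtain ⟨hlen, hv⟩ := hpre
  match board with
  | [] => simp at hlen
  | [_] => simp at hlen
  | b0 :: b1 :: rest =>
    unfold Spec_solution solution solution_alt
    rw [PySem.List.pyGet?_zero_cons,
        show PySem.List.pyGet? (b0 :: b1 :: rest) 1 = some b1 from by simp [PySem.List.pyGet?, PySem.List.pyIdx?]]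
    simp only
    set lx := PySem.Int.floordiv b0 2 with hlx
    set ly := PySem.Int.floordiv b1 2 with hly
    by_cases hn : lx < 0 ∨ ly < 0
    · rw [if_pos hn, foldA_neg lx ly hn keyinput hv]
    · rw [if_neg hn]
      push_neg at hn
      rw [foldA_split lx ly hn.1 hn.2 keyinput hv 0 0 (by simpa using hn.1) (by simpa using hn.2)]
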